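-- pv_equiv track=rewrite | github.com/MrBrantCode/unitest_baseline | mut_generate/mist_train_taco/taco_3790/solution.py | max_elements_with_mex
-- ===== SOURCE A (Python) =====
-- from collections import Counter
--
-- def max_elements_with_mex(N, M, A):
--     A.sort()
--     flag = 1
--
--     # Check if all elements from 1 to M-1 are present
--     for i in range(1, M):
--         if i not in A:
--             flag = 0
--             break
--
--     if flag == 0:
--         return -1
--
--     # Count occurrences of elements in the array
--     d1 = Counter(A)
--     value = d1.get(M, 0)
--
--     # Return the maximum number of elements that can be chosen
--     return N - value
-- ===== SOURCE B (Python) =====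
-- def max_elements_with_mex(N, M, A):
--     A.sort()
--     need = 1
--     cnt = 0
--     for x in A:
--         if x == need:
--             need += 1
--         if x == M:
--             cnt += 1
--     if need < M:
--         return -1
--     return N - cnt
-- ===== Notes on version B (the rewrite author's own statement) =====
-- stated objective: alternative
-- what changed: A scans the value range 1..M-1 with a list-membership test per value and then builds a Counter; B makes one data-driven pass over the sorted array maintaining a 'need' pointer for the next required value while counting occurrences of M, so the value-range loop and the Counter disappear.
import Mathlib
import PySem

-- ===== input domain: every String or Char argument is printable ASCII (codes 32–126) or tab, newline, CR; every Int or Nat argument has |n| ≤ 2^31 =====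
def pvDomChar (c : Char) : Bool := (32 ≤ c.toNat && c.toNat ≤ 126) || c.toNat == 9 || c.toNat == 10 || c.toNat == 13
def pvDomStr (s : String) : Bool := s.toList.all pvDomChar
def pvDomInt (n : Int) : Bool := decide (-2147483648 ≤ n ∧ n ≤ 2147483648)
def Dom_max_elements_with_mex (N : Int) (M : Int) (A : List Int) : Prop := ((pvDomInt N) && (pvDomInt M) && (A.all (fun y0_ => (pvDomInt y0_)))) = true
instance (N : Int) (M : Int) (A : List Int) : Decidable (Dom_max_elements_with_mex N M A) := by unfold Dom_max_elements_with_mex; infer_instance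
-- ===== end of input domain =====

-- B replaces A's loop over the value range 1..M-1 (a membership test per value, plus a
-- Counter) by a single pass over the sorted array (objective: alternative). Both programs
-- sort A in place; the theorems below are about the RETURN value only.

-- ===== PORT A =====
-- the 'for i in range(1, M): if i not in A: flag = 0; break' loop (returns the final
-- flag; Python's range is lazy and the loop breaks at the first missing value, so the
-- port recurses over the loop counter rather than materialising the range)
def pvAFlagLoop (AS : List Int) (i M : Int) : Int :=
  if i < M then
    if i ∈ AS then pvAFlagLoop AS (i + 1) M else 0
  else 1
termination_by (M - i).toNat
decreasing_by omega

def max_elements_with_mex (N : Int) (M : Int) (A : List Int) : Int :=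
  let AS := PySem.List.sorted A (fun x => x) false   -- A.sort() (in-place; return value only)
  let flag := pvAFlagLoop AS 1 M
  if flag = 0 then -1
  else
    let d1 := PySem.Dict.counter AS
    let value := d1.getD M 0
    N - value

-- ===== PORT B =====
def max_elements_with_mex_alt (N : Int) (M : Int) (A : List Int) : Int :=
  let AS := PySem.List.sorted A (fun x => x) false   -- A.sort() (in-place; return value only)
  let p := AS.foldl (fun (st : Int × Int) x =>
      (if x = st.1 then st.1 + 1 else st.1, if x = M then st.2 + 1 else st.2)) (1, 0)
  if p.1 < M then -1 else N - p.2

-- ===== PRECONDITION & SPEC =====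
def Spec_max_elements_with_mex (N : Int) (M : Int) (A : List Int) (out : Int) : Prop := out = max_elements_with_mex_alt N M A
instance (N : Int) (M : Int) (A : List Int) (out : Int) : Decidable (Spec_max_elements_with_mex N M A out) := by unfold Spec_max_elements_with_mex; infer_instance

-- ===== CLAIM (what is proved, stated in full; the proofs are below) =====
def Claim_equal_max_elements_with_mex : Prop := ∀ (N : Int) (M : Int) (A : List Int), Dom_max_elements_with_mex N M A → Spec_max_elements_with_mex N M A (max_elements_with_mex N M A)

-- ===== LEMMAS AND PROOFS =====

-- the 'need' component of B's fold, on its own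
def pvNeed (L : List Int) (k : Int) : Int :=
  L.foldl (fun k x => if x = k then k + 1 else k) k

theorem pvFold_fst (M : Int) (L : List Int) (k c : Int) :
    (L.foldl (fun (st : Int × Int) x =>
      (if x = st.1 then st.1 + 1 else st.1, if x = M then st.2 + 1 else st.2)) (k, c)).1
      = pvNeed L k := by
  induction L generalizing k c with
  | nil => rfl
  | cons x xs ih => simp only [pvNeed, List.foldl] at *; split_ifs <;> exact ih _ _

theorem pvFold_snd (M : Int) (L : List Int) (k c : Int) :
    (L.foldl (fun (st : Int × Int) x =>
      (if x = st.1 then st.1 + 1 else st.1, if x = M then st.2 + 1 else st.2)) (k, c)).2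
      = c + L.count M := by
  induction L generalizing k c with
  | nil => simp
  | cons x xs ih =>
    simp only [List.foldl, List.count_cons]
    rw [ih]
    by_cases h : x = M <;> simp [h] <;> ring

theorem pvNeed_gt (L : List Int) (k : Int) (h : ∀ y ∈ L, k < y) : pvNeed L k = k := by
  induction L with
  | nil => rfl
  | cons x xs ih =>
    have hx := h x (by simp)
    simp only [pvNeed, List.foldl] at *
    rw [if_neg (by omega)]
    exact ih (fun y hy => h y (by simp [hy]))

-- main characterisation: on a sorted list the final 'need' passes M iff 1..M-1 are all present
theorem pvNeed_char (L : List Int) (hs : L.Pairwise (· ≤ ·)) (k M : Int) :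
    M ≤ pvNeed L k ↔ ∀ i : Int, k ≤ i → i < M → i ∈ L := by
  induction L generalizing k with
  | nil =>
    simp only [pvNeed, List.foldl, List.not_mem_nil]
    constructor
    · intro h i h1 h2; omega
    · intro h; by_contra hc
      exact h k le_rfl (by omega)
  | cons x xs ih =>
    have hx : ∀ y ∈ xs, x ≤ y := (List.pairwise_cons.mp hs).1
    have hp : xs.Pairwise (· ≤ ·) := (List.pairwise_cons.mp hs).2
    by_cases hxk : x = k
    · subst hxk
      simp only [pvNeed, List.foldl, if_true]
      rw [show (List.foldl (fun k x => if x = k then k + 1 else k) (x+1) xs) = pvNeed xs (x+1) from rfl,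
          ih hp (x+1)]
      constructor
      · intro h i h1 h2
        by_cases hix : i = x
        · simp [hix]
        · exact List.mem_cons_of_mem _ (h i (by omega) h2)
      · intro h i h1 h2
        rcases List.mem_cons.mp (h i (by omega) h2) with h3 | h3
        · omega
        · exact h3
    · simp only [pvNeed, List.foldl, if_neg hxk]
      rw [show (List.foldl (fun k x => if x = k then k + 1 else k) k xs) = pvNeed xs k from rfl]
      by_cases hlt : x < k
      · rw [ih hp k]
        constructor
        · intro h i h1 h2; exact List.mem_cons_of_mem _ (h i h1 h2)
        · intro h i h1 h2
          rcases List.mem_cons.mp (h i h1 h2) with h3 | h3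
          · omega
          · exact h3
      · -- k < x : k is missing from x :: xs and from xs
        have hkx : k < x := by omega
        by_cases hMk : M ≤ k
        · constructor
          · intro _ i h1 h2; omega
          · intro _; rw [ih hp k]; intro i h1 h2; omega
        · have h1 : pvNeed xs k = k := pvNeed_gt xs k (fun y hy => lt_of_lt_of_le hkx (hx y hy))
          rw [h1]
          constructor
          · intro h; omega
          · intro h
            have := h k le_rfl (by omega)
            rcases List.mem_cons.mp this with h3 | h3
            · omega
            · exact absurd (hx k h3) (by omega)

-- A's flag loop returns 0 exactly when some value of the remaining range is missing
theorem pvAFlagLoop_eq_zero (AS : List Int) (i M : Int) :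
    pvAFlagLoop AS i M = 0 ↔ ¬ (∀ j : Int, i ≤ j → j < M → j ∈ AS) := by
  fun_induction pvAFlagLoop AS i M with
  | case1 i h hm ih =>
    rw [ih]
    constructor
    · intro hc hall; exact hc (fun j h1 h2 => hall j (by omega) h2)
    · intro hc hall
      apply hc; intro j h1 h2
      by_cases hji : j = i
      · subst hji; exact hm
      · exact hall j (by omega) h2
  | case2 i h hm =>
    constructor
    · intro _ hall; exact hm (hall i le_rfl h)
    · intro _; rfl
  | case3 i h =>
    constructor
    · intro hc; exact absurd hc one_ne_zero
    · intro hc; exact absurd (fun j h1 h2 => absurd h2 (by omega)) hc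

-- ===== VERDICT (by name: the statement is the Claim_ definition above) =====
theorem max_elements_with_mex_spec : Claim_equal_max_elements_with_mex := by
  intro N M A _
  unfold Spec_max_elements_with_mex max_elements_with_mex max_elements_with_mex_alt
  dsimp only
  set AS := PySem.List.sorted A (fun x => x) false with hAS
  have hsorted : AS.Pairwise (· ≤ ·) := by
    have := PySem.List.sorted_pairwise A (fun x => x) (κ := Int)
    simpa [hAS] using this
  have hflag : pvAFlagLoop AS 1 M = 0 ↔ ¬ (M ≤ pvNeed AS 1) := by
    rw [pvAFlagLoop_eq_zero, pvNeed_char AS hsorted 1 M]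
  rw [pvFold_fst, pvFold_snd, PySem.Dict.getD_counter]
  by_cases h0 : pvAFlagLoop AS 1 M = 0
  · rw [if_pos h0, if_pos (by have := hflag.mp h0; omega)]
  · rw [if_neg h0]
    have : M ≤ pvNeed AS 1 := by
      by_contra hc; exact h0 (hflag.mpr hc)
    rw [if_neg (by omega)]
    simp
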